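-- pv_equiv track=rewrite | github.com/Fallen37/Vth-Sem-Main-EL | src/services/multimodal_input.py | _detect_button_intent
-- ===== SOURCE A (Python) =====
-- from enum import Enum
-- from typing import Any, Optional, Protocol
--
-- class Intent(str, Enum):
--     """Detected intent from user input."""
--
--     QUESTION = "question"
--     GREETING = "greeting"
--     HELP_REQUEST = "help_request"
--     COMPREHENSION_FEEDBACK = "comprehension_feedback"
--     TOPIC_CHANGE = "topic_change"
--     CLARIFICATION = "clarification"
--     EXAMPLE_REQUEST = "example_request"
--     BREAK_REQUEST = "break_request"
--     UNKNOWN = "unknown"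
--
-- def _detect_button_intent(
--
--     button_id: str,
--     button_value: Optional[str],
-- ) -> Intent:
--     """Detect intent from button click context."""
--     button_id_lower = button_id.lower()
--
--     # Comprehension feedback buttons
--     if any(x in button_id_lower for x in ["understood", "partial", "not_understood"]):
--         return Intent.COMPREHENSION_FEEDBACK
--
--     # Help/break buttons
--     if "break" in button_id_lower or "pause" in button_id_lower:
--         return Intent.BREAK_REQUEST
--     if "help" in button_id_lower:
--         return Intent.HELP_REQUEST
--
--     # Example request buttons
--     if "example" in button_id_lower:
--         return Intent.EXAMPLE_REQUEST
--
--     # Topic/navigation buttons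
--     if any(x in button_id_lower for x in ["topic", "next", "previous"]):
--         return Intent.TOPIC_CHANGE
--
--     # Clarification buttons
--     if any(x in button_id_lower for x in ["clarify", "explain_more", "part_"]):
--         return Intent.CLARIFICATION
--
--     return Intent.UNKNOWN
-- ===== SOURCE B (Python) =====
-- from enum import Enum
-- from typing import Optional
--
-- class Intent(str, Enum):
--     QUESTION = "question"
--     GREETING = "greeting"
--     HELP_REQUEST = "help_request"
--     COMPREHENSION_FEEDBACK = "comprehension_feedback"
--     TOPIC_CHANGE = "topic_change"
--     CLARIFICATION = "clarification"
--     EXAMPLE_REQUEST = "example_request"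
--     BREAK_REQUEST = "break_request"
--     UNKNOWN = "unknown"
--
-- # keyword -> priority (lower = higher precedence, matching A's branch order)
-- _KW = {
--     "understood": 0, "partial": 0, "not_understood": 0,
--     "break": 1, "pause": 1,
--     "help": 2,
--     "example": 3,
--     "topic": 4, "next": 4, "previous": 4,
--     "clarify": 5, "explain_more": 5, "part_": 5,
-- }
-- _INTENTS = [
--     Intent.COMPREHENSION_FEEDBACK, Intent.BREAK_REQUEST, Intent.HELP_REQUEST,
--     Intent.EXAMPLE_REQUEST, Intent.TOPIC_CHANGE, Intent.CLARIFICATION,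
-- ]
--
-- def _detect_button_intent(button_id: str, button_value: Optional[str]) -> Intent:
--     # One scan over the positions of the lowercased id: at each position,
--     # any keyword starting there lowers the best (minimum) priority seen.
--     s = button_id.lower()
--     best = 6
--     for i in range(len(s)):
--         for k, p in _KW.items():
--             if s.startswith(k, i):
--                 best = min(best, p)
--     return _INTENTS[best] if best < 6 else Intent.UNKNOWN
-- ===== Notes on version B (the rewrite author's own statement) =====
-- stated objective: alternative
-- what changed: Instead of A's ordered cascade of per-group substring tests, B makes one scan over the positions of the lowercased id, prefix-matching a keyword->priority table at each position and accumulating the minimum priority, which then indexes an intent table.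
import Mathlib
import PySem

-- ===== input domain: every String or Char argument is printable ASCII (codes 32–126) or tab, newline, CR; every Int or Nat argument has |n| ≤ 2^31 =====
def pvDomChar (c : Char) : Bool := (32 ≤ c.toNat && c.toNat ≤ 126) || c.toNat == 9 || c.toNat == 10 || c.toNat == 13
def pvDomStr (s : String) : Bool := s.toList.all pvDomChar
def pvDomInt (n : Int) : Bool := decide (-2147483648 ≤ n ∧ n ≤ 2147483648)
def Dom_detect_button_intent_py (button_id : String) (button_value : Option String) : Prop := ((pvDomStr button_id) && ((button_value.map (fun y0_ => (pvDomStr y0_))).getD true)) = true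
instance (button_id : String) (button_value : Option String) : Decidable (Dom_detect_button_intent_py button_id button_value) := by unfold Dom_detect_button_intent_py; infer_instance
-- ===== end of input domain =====

-- B replaces A's substring-cascade by one scan over the positions of the lowercased id,
-- accumulating the minimum keyword priority found by prefix matching (alternative decomposition).


-- ===== PORT A =====
-- Literal transliteration of A's branch cascade.
def detect_button_intent_py (button_id : String) (button_value : Option String) : String :=
  let button_id_lower := PySem.Str.lower button_id
  if (["understood", "partial", "not_understood"].any (fun x => PySem.Str.isIn x button_id_lower)) then
    "comprehension_feedback"
  else if PySem.Str.isIn "break" button_id_lower || PySem.Str.isIn "pause" button_id_lower then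
    "break_request"
  else if PySem.Str.isIn "help" button_id_lower then
    "help_request"
  else if PySem.Str.isIn "example" button_id_lower then
    "example_request"
  else if (["topic", "next", "previous"].any (fun x => PySem.Str.isIn x button_id_lower)) then
    "topic_change"
  else if (["clarify", "explain_more", "part_"].any (fun x => PySem.Str.isIn x button_id_lower)) then
    "clarification"
  else
    "unknown"

-- ===== PORT B =====
-- keyword -> priority table (_KW in Source B, insertion order)
def pvKw : List (List Char × Nat) :=
  [ ("understood".toList, 0), ("partial".toList, 0), ("not_understood".toList, 0)
  , ("break".toList, 1), ("pause".toList, 1)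
  , ("help".toList, 2)
  , ("example".toList, 3)
  , ("topic".toList, 4), ("next".toList, 4), ("previous".toList, 4)
  , ("clarify".toList, 5), ("explain_more".toList, 5), ("part_".toList, 5) ]

-- _INTENTS in Source B
def pvIntents : List String :=
  ["comprehension_feedback", "break_request", "help_request",
   "example_request", "topic_change", "clarification"]

-- inner loop of Source B: `for k, p in _KW.items(): if s.startswith(k, i): best = min(best, p)`
-- (`s.startswith(k, i)` with 0 ≤ i ≤ len(s) is exactly: k is a prefix of s[i:])
def pvInner (s : List Char) (best : Nat) (i : Nat) : Nat :=
  pvKw.foldl (fun b kp => if kp.1.isPrefixOf (s.drop i) then min b kp.2 else b) best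

-- outer loop of Source B: `for i in range(len(s)): ...` starting from best = 6
def pvBest (s : List Char) : Nat :=
  (List.range s.length).foldl (pvInner s) 6

def detect_button_intent_py_alt (button_id : String) (button_value : Option String) : String :=
  let best := pvBest (PySem.Chars.lower button_id.toList)
  if best < 6 then pvIntents.getD best "unknown" else "unknown"

-- ===== PRECONDITION & SPEC =====
def Spec_detect_button_intent_py (button_id : String) (button_value : Option String) (out : String) : Prop := out = detect_button_intent_py_alt button_id button_value
instance (button_id : String) (button_value : Option String) (out : String) : Decidable (Spec_detect_button_intent_py button_id button_value out) := by unfold Spec_detect_button_intent_py; infer_instance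

-- ===== CLAIM (what is proved, stated in full; the proofs are below) =====
def Claim_equal_detect_button_intent_py : Prop := ∀ (button_id : String) (button_value : Option String), Dom_detect_button_intent_py button_id button_value → Spec_detect_button_intent_py button_id button_value (detect_button_intent_py button_id button_value)

-- ===== LEMMAS AND PROOFS =====

-- ≤-characterization of the inner (keyword) fold
theorem pv_foldK_le (c : List Char × Nat → Bool) (K : List (List Char × Nat)) (b n : Nat) :
    K.foldl (fun b kp => if c kp then min b kp.2 else b) b ≤ n ↔
      b ≤ n ∨ ∃ kp ∈ K, c kp ∧ kp.2 ≤ n := by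
  induction K generalizing b with
  | nil => simp
  | cons hd tl ih =>
    simp only [List.foldl_cons, ih, List.mem_cons]
    by_cases h : c hd = true
    · simp only [h, if_true, min_le_iff]
      constructor
      · rintro ((hb | hp) | ⟨kp, hm, hc, hp⟩)
        · exact Or.inl hb
        · exact Or.inr ⟨hd, Or.inl rfl, h, hp⟩
        · exact Or.inr ⟨kp, Or.inr hm, hc, hp⟩
      · rintro (hb | ⟨kp, hm, hc, hp⟩)
        · exact Or.inl (Or.inl hb)
        · rcases hm with rfl | hm
          · exact Or.inl (Or.inr hp)
          · exact Or.inr ⟨kp, hm, hc, hp⟩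
    · rw [Bool.not_eq_true] at h
      simp only [h, Bool.false_eq_true, if_false]
      constructor
      · rintro (hb | ⟨kp, hm, hc, hp⟩)
        · exact Or.inl hb
        · exact Or.inr ⟨kp, Or.inr hm, hc, hp⟩
      · rintro (hb | ⟨kp, hm, hc, hp⟩)
        · exact Or.inl hb
        · rcases hm with rfl | hm
          · exact absurd hc (by simp [h])
          · exact Or.inr ⟨kp, hm, hc, hp⟩

-- ≤-characterization of the outer (position) fold
theorem pv_foldL_le (s : List Char) (L : List Nat) (b n : Nat) :
    L.foldl (pvInner s) b ≤ n ↔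
      b ≤ n ∨ ∃ i ∈ L, ∃ kp ∈ pvKw, kp.1.isPrefixOf (s.drop i) ∧ kp.2 ≤ n := by
  induction L generalizing b with
  | nil => simp
  | cons hd tl ih =>
    simp only [List.foldl_cons, ih, List.mem_cons, pvInner,
      pv_foldK_le (fun kp => kp.1.isPrefixOf (s.drop hd))]
    constructor
    · rintro ((hb | ⟨kp, hm, hc, hp⟩) | ⟨i, hi, kp, hm, hc, hp⟩)
      · exact Or.inl hb
      · exact Or.inr ⟨hd, Or.inl rfl, kp, hm, hc, hp⟩
      · exact Or.inr ⟨i, Or.inr hi, kp, hm, hc, hp⟩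
    · rintro (hb | ⟨i, hi, kp, hm, hc, hp⟩)
      · exact Or.inl (Or.inl hb)
      · rcases hi with rfl | hi
        · exact Or.inl (Or.inr ⟨kp, hm, hc, hp⟩)
        · exact Or.inr ⟨i, hi, kp, hm, hc, hp⟩

-- a keyword occurs at some scanned position iff it is a substring (keywords are nonempty)
theorem pv_occ_iff (k s : List Char) (hk : k ≠ []) :
    (∃ i ∈ List.range s.length, k.isPrefixOf (s.drop i)) ↔ PySem.Chars.isIn k s = true := by
  rw [← PySem.Chars.exists_prefix_drop_iff_isIn]
  constructor
  · rintro ⟨i, _, hp⟩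
    exact ⟨i, List.isPrefixOf_iff_prefix.mp hp⟩
  · rintro ⟨j, hp⟩
    by_cases hj : j < s.length
    · exact ⟨j, List.mem_range.mpr hj, List.isPrefixOf_iff_prefix.mpr hp⟩
    · rw [List.drop_eq_nil_of_le (le_of_not_gt hj)] at hp
      exact absurd (List.prefix_nil.mp hp) hk

-- the occurrence-based keyword fold (loop-interchanged form of pvBest)
def pvOccFold (s : List Char) : Nat :=
  pvKw.foldl (fun b kp => if PySem.Chars.isIn kp.1 s then min b kp.2 else b) 6

theorem pvBest_eq_occFold (s : List Char) : pvBest s = pvOccFold s := by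
  have key : ∀ n, pvBest s ≤ n ↔ pvOccFold s ≤ n := by
    intro n
    rw [pvBest, pvOccFold, pv_foldL_le,
      pv_foldK_le (fun kp => PySem.Chars.isIn kp.1 s)]
    constructor
    · rintro (hb | ⟨i, hi, kp, hm, hc, hp⟩)
      · exact Or.inl hb
      · refine Or.inr ⟨kp, hm, ?_, hp⟩
        have hk : kp.1 ≠ [] := by
          fin_cases hm <;> simp
        exact (pv_occ_iff kp.1 s hk).mp ⟨i, hi, hc⟩
    · rintro (hb | ⟨kp, hm, hc, hp⟩)
      · exact Or.inl hb
      · have hk : kp.1 ≠ [] := by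
          fin_cases hm <;> simp
        obtain ⟨i, hi, hpre⟩ := (pv_occ_iff kp.1 s hk).mpr hc
        exact Or.inr ⟨i, hi, kp, hm, hpre, hp⟩
  exact le_antisymm ((key _).mpr le_rfl) ((key _).mp le_rfl)

-- loop-interchanged fold written over a literal list of (match?, priority) pairs
theorem pvOccFold_map_form (s : List Char) :
    pvOccFold s =
      (pvKw.map (fun kp => (PySem.Chars.isIn kp.1 s, kp.2))).foldl
        (fun b x => if x.1 then min b x.2 else b) 6 := by
  rw [List.foldl_map]; rfl

-- ===== VERDICT (by name: the statement is the Claim_ definition above) =====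
theorem detect_button_intent_py_spec : Claim_equal_detect_button_intent_py := by
  intro button_id button_value _
  unfold Spec_detect_button_intent_py detect_button_intent_py detect_button_intent_py_alt
  rw [pvBest_eq_occFold, pvOccFold_map_form]
  simp only [pvKw, List.map_cons, List.map_nil, List.any_cons, List.any_nil,
    Bool.or_false, PySem.Str.isIn_eq, PySem.Str.toList_lower]
  generalize PySem.Chars.lower button_id.toList = s
  generalize PySem.Chars.isIn "understood".toList s = b1
  generalize PySem.Chars.isIn "partial".toList s = b2
  generalize PySem.Chars.isIn "not_understood".toList s = b3
  generalize PySem.Chars.isIn "break".toList s = b4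
  generalize PySem.Chars.isIn "pause".toList s = b5
  generalize PySem.Chars.isIn "help".toList s = b6
  generalize PySem.Chars.isIn "example".toList s = b7
  generalize PySem.Chars.isIn "topic".toList s = b8
  generalize PySem.Chars.isIn "next".toList s = b9
  generalize PySem.Chars.isIn "previous".toList s = b10
  generalize PySem.Chars.isIn "clarify".toList s = b11
  generalize PySem.Chars.isIn "explain_more".toList s = b12
  generalize PySem.Chars.isIn "part_".toList s = b13
  revert b1 b2 b3 b4 b5 b6 b7 b8 b9 b10 b11 b12 b13
  decide
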